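-- pv_equiv track=rewrite | github.com/Brunobetiatto/recursividade_trabalho | exercicio5.py | pertence_S
-- ===== SOURCE A (Python) =====
-- def pertence_S(s):
--     if s == "a" or s == "b":
--         return True
--     elif s[0] == "a":
--         return pertence_S(s[1:])
--     elif s[0] == "b":
--         return pertence_S(s[1:])
--     else:
--         return False
-- ===== SOURCE B (Python) =====
-- def pertence_S(s):
--     return s != "" and all(c in "ab" for c in s)
-- ===== Notes on version B (the rewrite author's own statement) =====
-- stated objective: simpler
-- what changed: Replaces A's head-stripping tail recursion (with O(n^2) slicing) by a single flat scan: nonempty and every character in {a,b}.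
import Mathlib
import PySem

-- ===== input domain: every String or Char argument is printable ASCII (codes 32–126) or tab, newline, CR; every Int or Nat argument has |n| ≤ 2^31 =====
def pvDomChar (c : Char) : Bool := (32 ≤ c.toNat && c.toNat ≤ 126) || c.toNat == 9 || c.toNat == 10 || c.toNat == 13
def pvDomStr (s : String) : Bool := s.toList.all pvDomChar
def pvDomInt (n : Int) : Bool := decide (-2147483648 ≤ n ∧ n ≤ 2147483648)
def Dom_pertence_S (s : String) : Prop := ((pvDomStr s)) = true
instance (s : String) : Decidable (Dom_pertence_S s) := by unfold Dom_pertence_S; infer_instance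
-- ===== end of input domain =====

-- B replaces A's head-stripping tail recursion by a single flat scan (nonempty ∧ all chars in {a,b}); simpler. A raises IndexError on "", excluded by Pre_ (B returns False there).


-- ===== PORT A =====
-- literal transliteration of A's recursion over the character list; [] is Python's IndexError case (excluded by Pre_)
def pertAuxA : List Char → Bool
  | [] => false          -- s[0] on "" raises IndexError in Python; unreachable under Pre_
  | c :: rest =>
    if (c :: rest) = ['a'] ∨ (c :: rest) = ['b'] then true
    else if c = 'a' then pertAuxA rest
    else if c = 'b' then pertAuxA rest
    else false

def pertence_S (s : String) : Bool := pertAuxA s.toList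

-- ===== PORT B =====
def pertence_S_alt (s : String) : Bool :=
  (!(s == "")) && s.toList.all (fun c => c == 'a' || c == 'b')

-- ===== PRECONDITION & SPEC =====
-- Pre_ excludes only the empty string, on which A raises IndexError.
def Pre_pertence_S (s : String) : Prop := s ≠ ""
instance (s : String) : Decidable (Pre_pertence_S s) := by unfold Pre_pertence_S; infer_instance
def pvWitness_pertence_S : String := "ab"

def Spec_pertence_S (s : String) (out : Bool) : Prop := out = pertence_S_alt s
instance (s : String) (out : Bool) : Decidable (Spec_pertence_S s out) := by unfold Spec_pertence_S; infer_instance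

-- ===== CLAIM (what is proved, stated in full; the proofs are below) =====
def Claim_equal_pertence_S : Prop := ∀ (s : String), Dom_pertence_S s → Pre_pertence_S s → Spec_pertence_S s (pertence_S s)

-- ===== LEMMAS AND PROOFS =====
theorem pertAuxA_eq_all (l : List Char) (h : l ≠ []) :
    pertAuxA l = l.all (fun c => c == 'a' || c == 'b') := by
  induction l with
  | nil => exact absurd rfl h
  | cons c rest ih =>
    rcases Decidable.em (rest = []) with hr | hr
    · subst hr
      simp [pertAuxA, List.all]
      by_cases hc : c = 'a'
      · simp [hc]
      · by_cases hb : c = 'b' <;> simp [hc, hb]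
    · have ih' := ih hr
      have hbase : ¬ (c :: rest = ['a'] ∨ c :: rest = ['b']) := by
        rintro (h1 | h1) <;> · injection h1 with _ h2; exact hr h2
      by_cases hc : c = 'a'
      · simp [pertAuxA, hbase, hc, ih', List.all, hr]
      · by_cases hb : c = 'b' <;> simp [pertAuxA, hbase, hc, hb, ih', List.all, hr]

theorem toList_ne_nil (s : String) (h : s ≠ "") : s.toList ≠ [] := by
  intro hl
  apply h
  have := congrArg String.ofList hl
  simpa using this

-- ===== VERDICT (by name: the statement is the Claim_ definition above) =====
theorem pertence_S_spec : Claim_equal_pertence_S := by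
  intro s _ hpre
  unfold Spec_pertence_S pertence_S pertence_S_alt
  have hne : s.toList ≠ [] := toList_ne_nil s hpre
  rw [pertAuxA_eq_all s.toList hne]
  have : (s == "") = false := by
    simpa [beq_eq_false_iff_ne] using hpre
  simp [this]
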